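-- pv_equiv track=rewrite | github.com/carnival77/Algorithm_Practice | Codility/Test_251016/1/1.py | solution
-- ===== SOURCE A (Python) =====
-- from itertools import combinations
--
-- def solution(E):
--
--     ans=0
--     a=[[] for _ in range(10)]
--
--     for emp_num,days in enumerate(E):
--         # days=list(days)
--         for day in days:
--             day_num=int(day)
--             a[day_num].append(emp_num)
--
--     for r in [1,2]:
--         for comb in combinations(a,2):
--             tmp=set()
--             for group in comb:
--                 tmp.update(group)
--             ans=max(ans,len(tmp))
--
--     return ans
-- ===== SOURCE B (Python) =====
-- def solution(E):
--     # One 10-bit mask per employee (bit d set iff the employee works day d),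
--     # then for each day pair count employees whose mask meets the pair.
--     masks = []
--     for days in E:
--         m = 0
--         for d in days:
--             m |= 1 << d
--         masks.append(m)
--     best = 0
--     for d1 in range(10):
--         for d2 in range(d1 + 1, 10):
--             sel = (1 << d1) | (1 << d2)
--             c = 0
--             for m in masks:
--                 if m & sel:
--                     c += 1
--             best = max(best, c)
--     return best
-- ===== Notes on version B (the rewrite author's own statement) =====
-- stated objective: alternative
-- what changed: Replaces A's ten materialised employee-index buckets and 45 (done twice) set-union constructions with one 10-bit day mask per employee and a per-pair count of masks intersecting the pair, so no member lists or sets are ever built.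
-- outside the precondition, e.g. on solution([[-1]]): A returns 1, B raises ValueError
import Mathlib
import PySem

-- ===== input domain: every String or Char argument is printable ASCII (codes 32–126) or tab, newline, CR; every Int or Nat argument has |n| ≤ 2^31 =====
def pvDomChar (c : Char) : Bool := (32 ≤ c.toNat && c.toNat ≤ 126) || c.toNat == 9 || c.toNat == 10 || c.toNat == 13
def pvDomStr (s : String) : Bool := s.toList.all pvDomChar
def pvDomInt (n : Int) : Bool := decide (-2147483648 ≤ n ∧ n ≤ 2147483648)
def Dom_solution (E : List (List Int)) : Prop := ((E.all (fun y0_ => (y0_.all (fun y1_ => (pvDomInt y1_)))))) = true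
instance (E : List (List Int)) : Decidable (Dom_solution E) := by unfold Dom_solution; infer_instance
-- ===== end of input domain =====

-- B replaces A's ten employee-index buckets and repeated set unions by one 10-bit day
-- mask per employee and per-pair mask-intersection counting (objective: alternative).

-- ===== PORT A =====
def pvBuildA (E : List (List Int)) : List (List Int) :=
  (PySem.List.enumerate E 0).foldl
    (fun a p =>
      p.2.foldl
        (fun a day =>
          PySem.List.pySetD a day (PySem.List.pyGetD a day [] ++ [p.1])) a)
    (List.replicate 10 [])

def solution (E : List (List Int)) : Int :=
  let a := pvBuildA E
  ([1, 2] : List Int).foldl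
    (fun ans _ =>
      (PySem.List.combinations a 2).foldl
        (fun ans comb =>
          let tmp := comb.foldl (fun t g => PySem.Set.update t g) PySem.Set.empty
          max ans ((tmp.length : Int))) ans) 0

-- ===== PORT B =====
def pvMaskOf (days : List Int) : Int :=
  days.foldl (fun m d => PySem.Int.bor m ((1 : Int) <<< d.toNat)) 0

def pvMasks (E : List (List Int)) : List Int :=
  E.foldl (fun ms days => ms ++ [pvMaskOf days]) []

def pvCount (masks : List Int) (sel : Int) : Int :=
  masks.foldl (fun c m => if PySem.Int.band m sel ≠ 0 then c + 1 else c) 0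

def solution_alt (E : List (List Int)) : Int :=
  let masks := pvMasks E
  (PySem.List.pyRange 0 10 1).foldl
    (fun best d1 =>
      (PySem.List.pyRange (d1 + 1) 10 1).foldl
        (fun best d2 =>
          let sel := PySem.Int.bor ((1 : Int) <<< d1.toNat) ((1 : Int) <<< d2.toNat)
          max best (pvCount masks sel)) best) 0

-- ===== PRECONDITION & SPEC =====
-- Pre_ restricts to the natural domain of day digits 0..9: outside it A either raises
-- IndexError (day ≥ 10 or day ≤ -11) or returns via negative-index wraparound
-- (days -10..-1), where B raises ValueError (negative shift count).
def Pre_solution (E : List (List Int)) : Prop :=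
  ∀ days ∈ E, ∀ d ∈ days, 0 ≤ d ∧ d ≤ 9
instance (E : List (List Int)) : Decidable (Pre_solution E) := by
  unfold Pre_solution; infer_instance

def pvWitness_solution : List (List Int) := [[0, 1], [1, 2], [9]]

def Spec_solution (E : List (List Int)) (out : Int) : Prop := out = solution_alt E
instance (E : List (List Int)) (out : Int) : Decidable (Spec_solution E out) := by
  unfold Spec_solution; infer_instance

-- ===== CLAIM (what is proved, stated in full; the proofs are below) =====
def Claim_equal_solution : Prop :=
  ∀ (E : List (List Int)), Dom_solution E → Pre_solution E → Spec_solution E (solution E)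

-- ===== LEMMAS AND PROOFS =====

-- the list of employee numbers day-bucket i collects, one copy per occurrence
def pvBucketFrom (E : List (List Int)) (s : Int) (i : Nat) : List Int :=
  (PySem.List.enumerate E s).flatMap
    (fun p => List.replicate (p.2.count (i : Int)) p.1)

-- Nat-level employee mask
def pvNatMask (days : List Int) : Nat :=
  days.foldl (fun m d => m ||| (1 <<< d.toNat)) 0

lemma pvInnerLen (days : List Int) (emp : Int) (a : List (List Int)) :
    (days.foldl (fun a day =>
      PySem.List.pySetD a day (PySem.List.pyGetD a day [] ++ [emp])) a).length
      = a.length := by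
  induction days generalizing a with
  | nil => rfl
  | cons d rest ih => simp [List.foldl_cons, ih, PySem.List.length_pySetD]

lemma pvInnerGet (days : List Int) (emp : Int) : ∀ (a : List (List Int)),
    a.length = 10 → (∀ d ∈ days, 0 ≤ d ∧ d ≤ 9) → ∀ i : Nat, i < 10 →
    (days.foldl (fun a day =>
      PySem.List.pySetD a day (PySem.List.pyGetD a day [] ++ [emp])) a).getD i []
      = a.getD i [] ++ List.replicate (days.count (i : Int)) emp := by
  induction days with
  | nil => intro a ha hd i hi; simp
  | cons d rest ih =>
      intro a ha hd i hi
      obtain ⟨hd0, hd9⟩ := hd d List.mem_cons_self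
      have hdlt : d < (a.length : Int) := by rw [ha]; omega
      rw [List.foldl_cons, PySem.List.pySetD_of_nonneg a _ hd0,
        PySem.List.pyGetD_eq_getElem a [] hd0 hdlt]
      have hlen' : (a.set d.toNat ((a[d.toNat]'(by omega)) ++ [emp])).length = 10 := by
        simp [ha]
      rw [ih _ hlen' (fun x hx => hd x (List.mem_cons_of_mem d hx)) i hi]
      rw [List.getD_eq_getElem _ _ (by omega), List.getElem_set,
        List.getD_eq_getElem a _ (by omega : i < a.length)]
      by_cases hcase : d.toNat = i
      · have hdi : d = (i : Int) := by omega
        simp [hdi, List.replicate_succ]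
      · have hdi : ¬ (d = (i : Int)) := by omega
        simp [hcase, hdi]

lemma pvOuterLen (E : List (List Int)) (s : Int) (a : List (List Int)) :
    ((PySem.List.enumerate E s).foldl
      (fun a p =>
        p.2.foldl (fun a day =>
          PySem.List.pySetD a day (PySem.List.pyGetD a day [] ++ [p.1])) a) a).length
      = a.length := by
  induction E generalizing s a with
  | nil => rfl
  | cons days rest ih =>
      rw [PySem.List.enumerate_cons, List.foldl_cons, ih]
      exact pvInnerLen days s a

lemma pvOuterGet (E : List (List Int)) : ∀ (s : Int) (a : List (List Int)),
    a.length = 10 → (∀ days ∈ E, ∀ d ∈ days, 0 ≤ d ∧ d ≤ 9) → ∀ i : Nat, i < 10 →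
    ((PySem.List.enumerate E s).foldl
      (fun a p =>
        p.2.foldl (fun a day =>
          PySem.List.pySetD a day (PySem.List.pyGetD a day [] ++ [p.1])) a) a).getD i []
      = a.getD i [] ++ pvBucketFrom E s i := by
  induction E with
  | nil =>
      intro s a ha hd i hi
      simp [pvBucketFrom, PySem.List.enumerate_nil]
  | cons days rest ih =>
      intro s a ha hd i hi
      rw [PySem.List.enumerate_cons, List.foldl_cons]
      have hlen' : (days.foldl (fun a day =>
          PySem.List.pySetD a day (PySem.List.pyGetD a day [] ++ [s])) a).length = 10 := by
        rw [pvInnerLen]; exact ha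
      rw [ih (s + 1) _ hlen' (fun l hl => hd l (List.mem_cons_of_mem days hl)) i hi]
      rw [pvInnerGet days s a ha (hd days List.mem_cons_self) i hi]
      simp [pvBucketFrom, PySem.List.enumerate_cons, List.flatMap_cons]

lemma pvBuildA_eq (E : List (List Int)) (hd : ∀ days ∈ E, ∀ d ∈ days, 0 ≤ d ∧ d ≤ 9) :
    pvBuildA E = (List.range 10).map (fun i => pvBucketFrom E 0 i) := by
  have hlen : (pvBuildA E).length = 10 := by
    unfold pvBuildA; rw [pvOuterLen]; rfl
  apply List.ext_getElem
  · simp [hlen]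
  · intro i hi hi'
    have hi10 : i < 10 := by simpa [hlen] using hi
    rw [← List.getD_eq_getElem (pvBuildA E) [] hi]
    unfold pvBuildA
    rw [pvOuterGet E 0 (List.replicate 10 []) (by simp) hd i hi10]
    simp [hi10]
    have hlit : ∀ j, (h : j < 10) →
        ([[], [], [], [], [], [], [], [], [], []] : List (List Int))[j] = ([] : List Int) := by
      decide
    exact hlit i hi10

lemma pvMem_bucketFrom (E : List (List Int)) (i : Nat) (x : Int) :
    x ∈ pvBucketFrom E 0 i ↔
      ∃ k : Nat, k < E.length ∧ x = (k : Int) ∧ (i : Int) ∈ E.getD k [] := by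
  simp only [pvBucketFrom, List.mem_flatMap, PySem.List.mem_enumerate_iff,
    List.mem_replicate]
  constructor
  · rintro ⟨p, ⟨k, hk, rfl⟩, hcnt, rfl⟩
    refine ⟨k, hk, by simp, ?_⟩
    rw [List.getD_eq_getElem _ _ hk]
    exact List.count_pos_iff.mp (Nat.pos_of_ne_zero hcnt)
  · rintro ⟨k, hk, rfl, hmem⟩
    refine ⟨((0 : Int) + k, E[k]), ⟨k, hk, rfl⟩, ?_, by simp⟩
    rw [List.getD_eq_getElem _ _ hk] at hmem
    exact (List.count_pos_iff.mpr hmem).ne'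

-- length of the union set = countP over index range
lemma pvLenA (E : List (List Int)) (i j : Nat) :
    (((PySem.Set.update (PySem.Set.update PySem.Set.empty (pvBucketFrom E 0 i))
        (pvBucketFrom E 0 j)).length : Int))
      = ((List.range E.length).countP
          (fun k => decide ((i : Int) ∈ E.getD k [] ∨ (j : Int) ∈ E.getD k [])) : Int) := by
  rw [PySem.Set.update_empty, ← PySem.Set.ofList_append]
  have hnd : (PySem.Set.ofList (pvBucketFrom E 0 i ++ pvBucketFrom E 0 j)).Nodup :=
    PySem.Set.nodup_ofList _
  have hnd2 : (List.map (fun k : Nat => (k : Int)) ((List.range E.length).filter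
      (fun k => decide ((i : Int) ∈ E.getD k [] ∨ (j : Int) ∈ E.getD k [])))).Nodup :=
    ((List.nodup_range).filter _).map (fun a b h => by exact_mod_cast h)
  have hsame : ∀ x : Int,
      x ∈ PySem.Set.ofList (pvBucketFrom E 0 i ++ pvBucketFrom E 0 j) ↔
      x ∈ List.map (fun k : Nat => (k : Int)) ((List.range E.length).filter
        (fun k => decide ((i : Int) ∈ E.getD k [] ∨ (j : Int) ∈ E.getD k []))) := by
    intro x
    rw [PySem.Set.mem_ofList]
    simp only [List.mem_append, pvMem_bucketFrom, List.mem_map, List.mem_filter,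
      List.mem_range, decide_eq_true_eq]
    constructor
    · rintro (⟨k, hk, rfl, hm⟩ | ⟨k, hk, rfl, hm⟩)
      · exact ⟨k, ⟨hk, Or.inl hm⟩, rfl⟩
      · exact ⟨k, ⟨hk, Or.inr hm⟩, rfl⟩
    · rintro ⟨k, ⟨hk, hm | hm⟩, rfl⟩
      · exact Or.inl ⟨k, hk, rfl, hm⟩
      · exact Or.inr ⟨k, hk, rfl, hm⟩
  have hlen := ((List.perm_ext_iff_of_nodup hnd hnd2).mpr hsame).length_eq
  rw [hlen, List.length_map, ← List.countP_eq_length_filter]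

lemma pvRangeCountP (E : List (List Int)) (p : List Int → Bool) :
    (List.range E.length).countP (fun k => p (E.getD k [])) = E.countP p := by
  induction E with
  | nil => rfl
  | cons days rest ih =>
      rw [List.length_cons, List.range_succ_eq_map]
      simp only [List.countP_cons, List.countP_map, Function.comp_def,
        List.getD_cons_succ, List.getD_cons_zero, ih]

lemma pvMaskOf_aux (days : List Int) : ∀ n : Nat,
    days.foldl (fun m d => PySem.Int.bor m ((1 : Int) <<< d.toNat)) (n : Int)
      = ((days.foldl (fun m d => m ||| (1 <<< d.toNat)) n : Nat) : Int) := by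
  induction days with
  | nil => intro n; rfl
  | cons d rest ih =>
      intro n
      rw [List.foldl_cons, List.foldl_cons]
      have h1 : ((1 : Int) <<< (d.toNat : Int)) = (((1 <<< d.toNat : Nat)) : Int) := by
        rw [Int.shiftLeft_natCast_right, Int.shiftLeft_eq, Nat.shiftLeft_eq]
        push_cast; ring
      rw [h1, PySem.Int.bor_natCast, ih]

lemma pvMaskOf_natCast (days : List Int) :
    pvMaskOf days = ((pvNatMask days : Nat) : Int) := by
  have := pvMaskOf_aux days 0
  simpa [pvMaskOf, pvNatMask] using this

lemma pvNatMask_testBit (days : List Int) (n : Nat) (k : Nat) :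
    (days.foldl (fun m d => m ||| (1 <<< d.toNat)) n).testBit k
      = (n.testBit k || days.any (fun d => d.toNat == k)) := by
  induction days generalizing n with
  | nil => simp
  | cons d rest ih =>
      rw [List.foldl_cons, ih]
      simp only [Nat.testBit_or, Nat.shiftLeft_eq, one_mul, Nat.testBit_two_pow,
        List.any_cons]
      cases n.testBit k <;> cases h : (d.toNat == k) <;>
        simp [beq_iff_eq] at h ⊢ <;> simp [h]

lemma pvLenB (E : List (List Int)) (hd : ∀ days ∈ E, ∀ d ∈ days, 0 ≤ d ∧ d ≤ 9)
    (i j : Nat) (hi : i < 10) (hj : j < 10) :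
    pvCount (pvMasks E) (PySem.Int.bor ((1 : Int) <<< (i : Int)) ((1 : Int) <<< (j : Int)))
      = (E.countP (fun days => decide ((i : Int) ∈ days ∨ (j : Int) ∈ days)) : Int) := by
  have hone : ∀ k : Nat, ((1 : Int) <<< (k : Int)) = (((1 <<< k : Nat)) : Int) := by
    intro k
    rw [Int.shiftLeft_natCast_right, Int.shiftLeft_eq, Nat.shiftLeft_eq]
    push_cast; ring
  have hsel : PySem.Int.bor ((1 : Int) <<< (i : Int)) ((1 : Int) <<< (j : Int))
      = (((1 <<< i ||| 1 <<< j : Nat)) : Int) := by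
    rw [hone i, hone j, PySem.Int.bor_natCast]
  unfold pvCount pvMasks
  rw [PySem.List.foldl_append_singleton_eq_map, List.nil_append]
  have hcond : ∀ (c : Int) (m : Int),
      (if PySem.Int.band m (PySem.Int.bor ((1 : Int) <<< (i : Int)) ((1 : Int) <<< (j : Int))) ≠ 0
        then c + 1 else c)
      = (if (fun m => decide (PySem.Int.band m (PySem.Int.bor ((1 : Int) <<< (i : Int))
          ((1 : Int) <<< (j : Int))) ≠ 0)) m = true then c + 1 else c) := by
    intro c m; simp
  simp only [hcond]
  rw [PySem.List.foldl_count_if, List.countP_map, zero_add]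
  congr 1
  apply List.countP_congr
  intro days hdaysE
  have hb := hd days hdaysE
  simp only [Function.comp_apply, decide_eq_true_eq]
  rw [pvMaskOf_natCast, hsel, PySem.Int.band_natCast]
  rw [ne_eq, Int.natCast_eq_zero]
  constructor
  · intro hne
    obtain ⟨k, hk⟩ := Nat.exists_testBit_of_ne_zero hne
    rw [Nat.testBit_and] at hk
    have hm := (Bool.and_eq_true _ _).mp hk
    have hmask := hm.1
    have hselbit := hm.2
    unfold pvNatMask at hmask
    rw [pvNatMask_testBit days 0 k] at hmask
    simp only [Nat.zero_testBit, Bool.false_or, List.any_eq_true, beq_iff_eq] at hmask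
    obtain ⟨d, hdmem, hdk⟩ := hmask
    have hd0 := (hb d hdmem).1
    rw [Nat.testBit_or, Nat.shiftLeft_eq, Nat.shiftLeft_eq, one_mul, one_mul,
      Nat.testBit_two_pow, Nat.testBit_two_pow] at hselbit
    rcases Bool.or_eq_true _ _ |>.mp hselbit with h | h
    · left
      have hik : i = k := of_decide_eq_true h
      subst hik
      have hdi : d = (i : Int) := by omega
      exact hdi ▸ hdmem
    · right
      have hjk : j = k := of_decide_eq_true h
      subst hjk
      have hdj : d = (j : Int) := by omega
      exact hdj ▸ hdmem
  · intro hmem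
    have key : ∀ k : Nat, (k : Int) ∈ days → k = i ∨ k = j →
        (pvNatMask days &&& (1 <<< i ||| 1 <<< j)) ≠ 0 := by
      intro k hkmem hkij h0
      have hbit : (pvNatMask days &&& (1 <<< i ||| 1 <<< j)).testBit k = true := by
        rw [Nat.testBit_and]
        have h1 : (pvNatMask days).testBit k = true := by
          unfold pvNatMask
          rw [pvNatMask_testBit days 0 k]
          simp only [Nat.zero_testBit, Bool.false_or, List.any_eq_true, beq_iff_eq]
          exact ⟨(k : Int), hkmem, by omega⟩
        have h2 : ((1 <<< i ||| 1 <<< j : Nat)).testBit k = true := by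
          rw [Nat.testBit_or, Nat.shiftLeft_eq, Nat.shiftLeft_eq, one_mul, one_mul,
            Nat.testBit_two_pow, Nat.testBit_two_pow]
          rcases hkij with rfl | rfl <;> simp
        rw [h1, h2]; rfl
      rw [h0, Nat.zero_testBit] at hbit
      exact Bool.false_ne_true hbit
    rcases hmem with hmi | hmj
    · exact key i hmi (Or.inl rfl)
    · exact key j hmj (Or.inr rfl)

-- the per-pair value computed by A equals the one computed by B
lemma pvPairVal (E : List (List Int)) (hd : ∀ days ∈ E, ∀ d ∈ days, 0 ≤ d ∧ d ≤ 9)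
    (i j : Nat) (hi : i < 10) (hj : j < 10) :
    (((PySem.Set.update (PySem.Set.update PySem.Set.empty (pvBucketFrom E 0 i))
        (pvBucketFrom E 0 j)).length : Int))
      = pvCount (pvMasks E) (PySem.Int.bor ((1 : Int) <<< (i : Int)) ((1 : Int) <<< (j : Int))) := by
  rw [pvLenA, pvLenB E hd i j hi hj, ← pvRangeCountP E
    (fun days => decide ((i : Int) ∈ days ∨ (j : Int) ∈ days))]

lemma pvFoldlMax_of_le (l : List Int) (a : Int) (h : ∀ x ∈ l, x ≤ a) :
    l.foldl max a = a := by
  induction l generalizing a with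
  | nil => rfl
  | cons x rest ih =>
      rw [List.foldl_cons, max_eq_left (h x (by simp))]
      exact ih a (fun y hy => h y (by simp [hy]))

lemma pvFoldlMax_twice (l : List Int) (z : Int) :
    l.foldl max (l.foldl max z) = l.foldl max z :=
  pvFoldlMax_of_le l _ (PySem.List.le_foldl_max l z).2

lemma pvFoldlFoldlMax {α β : Type} (l : List α) (g : α → List β) (f : α → β → Int)
    (z : Int) :
    l.foldl (fun acc x => (g x).foldl (fun acc' y => max acc' (f x y)) acc) z
      = (l.flatMap (fun x => (g x).map (f x))).foldl max z := by
  induction l generalizing z with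
  | nil => rfl
  | cons x rest ih => simp [List.foldl_map, List.foldl_append, ih]

lemma pvFoldlMaxMap {α : Type} (l : List α) (f : α → Int) (z : Int) :
    l.foldl (fun acc x => max acc (f x)) z = (l.map f).foldl max z := by
  induction l generalizing z with
  | nil => rfl
  | cons x rest ih => simp [ih]

lemma pvMain (E : List (List Int)) (hd : ∀ days ∈ E, ∀ d ∈ days, 0 ≤ d ∧ d ≤ 9) :
    solution E = solution_alt E := by
  have hA : solution E =
      (PySem.List.combinations (pvBuildA E) 2).foldl
        (fun ans comb => max ans
          (((comb.foldl (fun t g => PySem.Set.update t g) PySem.Set.empty).length : Int)))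
        ((PySem.List.combinations (pvBuildA E) 2).foldl
          (fun ans comb => max ans
            (((comb.foldl (fun t g => PySem.Set.update t g) PySem.Set.empty).length : Int))) 0) := rfl
  have hB : solution_alt E =
      (PySem.List.pyRange 0 10 1).foldl
        (fun best d1 => (PySem.List.pyRange (d1 + 1) 10 1).foldl
          (fun best d2 => max best (pvCount (pvMasks E)
            (PySem.Int.bor ((1 : Int) <<< d1.toNat) ((1 : Int) <<< d2.toNat)))) best) 0 := rfl
  rw [hA, hB]
  rw [pvBuildA_eq E hd, PySem.List.combinations_map]
  rw [pvFoldlFoldlMax]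
  rw [pvFoldlMaxMap]
  rw [pvFoldlMaxMap (List.map (List.map fun i => pvBucketFrom E 0 i)
        (PySem.List.combinations (List.range 10) 2))
      (fun comb => ((comb.foldl (fun t g => PySem.Set.update t g) PySem.Set.empty).length : Int)) 0,
    pvFoldlMax_twice]
  have hc : PySem.List.combinations (List.range 10) 2 = ([[0, 1], [0, 2], [0, 3], [0, 4], [0, 5], [0, 6], [0, 7], [0, 8], [0, 9], [1, 2], [1, 3], [1, 4], [1, 5], [1, 6], [1, 7], [1, 8], [1, 9], [2, 3], [2, 4], [2, 5], [2, 6], [2, 7], [2, 8], [2, 9], [3, 4], [3, 5], [3, 6], [3, 7], [3, 8], [3, 9], [4, 5], [4, 6], [4, 7], [4, 8], [4, 9], [5, 6], [5, 7], [5, 8], [5, 9], [6, 7], [6, 8], [6, 9], [7, 8], [7, 9], [8, 9]] : List (List Nat)) := by decide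
  have hr0 : PySem.List.pyRange 0 10 1 = ([0, 1, 2, 3, 4, 5, 6, 7, 8, 9] : List Int) := by decide
  have hr1 : PySem.List.pyRange ((0 : Int) + 1) 10 1 = ([1, 2, 3, 4, 5, 6, 7, 8, 9] : List Int) := by decide
  have hr2 : PySem.List.pyRange ((1 : Int) + 1) 10 1 = ([2, 3, 4, 5, 6, 7, 8, 9] : List Int) := by decide
  have hr3 : PySem.List.pyRange ((2 : Int) + 1) 10 1 = ([3, 4, 5, 6, 7, 8, 9] : List Int) := by decide
  have hr4 : PySem.List.pyRange ((3 : Int) + 1) 10 1 = ([4, 5, 6, 7, 8, 9] : List Int) := by decide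
  have hr5 : PySem.List.pyRange ((4 : Int) + 1) 10 1 = ([5, 6, 7, 8, 9] : List Int) := by decide
  have hr6 : PySem.List.pyRange ((5 : Int) + 1) 10 1 = ([6, 7, 8, 9] : List Int) := by decide
  have hr7 : PySem.List.pyRange ((6 : Int) + 1) 10 1 = ([7, 8, 9] : List Int) := by decide
  have hr8 : PySem.List.pyRange ((7 : Int) + 1) 10 1 = ([8, 9] : List Int) := by decide
  have hr9 : PySem.List.pyRange ((8 : Int) + 1) 10 1 = ([9] : List Int) := by decide
  have hr10 : PySem.List.pyRange ((9 : Int) + 1) 10 1 = ([] : List Int) := by decide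
  rw [List.map_map, hc, hr0]
  simp only [hr1, hr2, hr3, hr4, hr5, hr6, hr7, hr8, hr9, hr10,
    List.flatMap_cons, List.flatMap_nil, List.map_cons, List.map_nil,
    Function.comp_apply, List.cons_append, List.nil_append, List.append_nil]
  congr 1
  simp only [List.cons.injEq, and_true]
  exact ⟨pvPairVal E hd 0 1 (by decide) (by decide), pvPairVal E hd 0 2 (by decide) (by decide), pvPairVal E hd 0 3 (by decide) (by decide), pvPairVal E hd 0 4 (by decide) (by decide), pvPairVal E hd 0 5 (by decide) (by decide), pvPairVal E hd 0 6 (by decide) (by decide), pvPairVal E hd 0 7 (by decide) (by decide), pvPairVal E hd 0 8 (by decide) (by decide), pvPairVal E hd 0 9 (by decide) (by decide), pvPairVal E hd 1 2 (by decide) (by decide), pvPairVal E hd 1 3 (by decide) (by decide), pvPairVal E hd 1 4 (by decide) (by decide), pvPairVal E hd 1 5 (by decide) (by decide), pvPairVal E hd 1 6 (by decide) (by decide), pvPairVal E hd 1 7 (by decide) (by decide), pvPairVal E hd 1 8 (by decide) (by decide), pvPairVal E hd 1 9 (by decide) (by decide), pvPairVal E hd 2 3 (by decide) (by decide), pvPairVal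 E hd 2 4 (by decide) (by decide), pvPairVal E hd 2 5 (by decide) (by decide), pvPairVal E hd 2 6 (by decide) (by decide), pvPairVal E hd 2 7 (by decide) (by decide), pvPairVal E hd 2 8 (by decide) (by decide), pvPairVal E hd 2 9 (by decide) (by decide), pvPairVal E hd 3 4 (by decide) (by decide), pvPairVal E hd 3 5 (by decide) (by decide), pvPairVal E hd 3 6 (by decide) (by decide), pvPairVal E hd 3 7 (by decide) (by decide), pvPairVal E hd 3 8 (by decide) (by decide), pvPairVal E hd 3 9 (by decide) (by decide), pvPairVal E hd 4 5 (by decide) (by decide), pvPairVal E hd 4 6 (by decide) (by decide), pvPairVal E hd 4 7 (by decide) (by decide), pvPairVal E hd 4 8 (by decide) (by decide), pvPairVal E hd 4 9 (by decide) (by decide), pvPairVal E hd 5 6 (by decide) (by decide), pvPairVal E hd 5 7 (by decide) (by decide), pvPairVal E hd 5 8 (by decide) (by decide), pvPairVal E hd 5 9 (by decide) (by decide), pvPairVal E hd 6 7 (by decide) (by decide), pvPairVal E hd 6 8 (by decide) (by decide), pvPairVal E hd 6 9 (by decide) (by decide), pvPairVal E hd 7 8 (by decide) (by decide), pvPairVal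 E hd 7 9 (by decide) (by decide), pvPairVal E hd 8 9 (by decide) (by decide)⟩

-- ===== VERDICT (by name: the statement is the Claim_ definition above) =====
theorem solution_spec : Claim_equal_solution := by
  intro E _ hpre
  unfold Spec_solution
  exact pvMain E hpre
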